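-- pv_equiv track=rewrite | github.com/pccxai/systemverilog-ide | src/pccx_ide_cli/module_organization.py | _port_connection_audit_state
-- ===== SOURCE A (Python) =====
-- from typing import Any
--
-- def _port_connection_audit_state(
--     preflight: dict[str, Any],
--     sites: list[dict[str, Any]],
-- ) -> str:
--     if preflight["status"] == "blocked":
--         return "blocked"
--     if any(site["audit_state"] == "blocked" for site in sites):
--         return "blocked"
--     if any(site["audit_state"] == "review-required" for site in sites):
--         return "review-required"
--     return "ready-for-review"
-- ===== SOURCE B (Python) =====
-- def _port_connection_audit_state(preflight, sites):
--     # Severity-rank fold: one pass keeping the max severity seen, early exit on "blocked".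
--     if preflight["status"] == "blocked":
--         return "blocked"
--     rank = {"blocked": 2, "review-required": 1}
--     best = 0
--     for site in sites:
--         r = rank.get(site["audit_state"], 0)
--         if r == 2:
--             return "blocked"
--         if r > best:
--             best = r
--     return "review-required" if best == 1 else "ready-for-review"
-- ===== Notes on version B (the rewrite author's own statement) =====
-- stated objective: alternative
-- what changed: Replaces the two repeated any() scans over sites with a single pass that folds a numeric severity rank (max accumulator with early exit on 'blocked') and maps the final rank back to a state string.
import Mathlib
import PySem

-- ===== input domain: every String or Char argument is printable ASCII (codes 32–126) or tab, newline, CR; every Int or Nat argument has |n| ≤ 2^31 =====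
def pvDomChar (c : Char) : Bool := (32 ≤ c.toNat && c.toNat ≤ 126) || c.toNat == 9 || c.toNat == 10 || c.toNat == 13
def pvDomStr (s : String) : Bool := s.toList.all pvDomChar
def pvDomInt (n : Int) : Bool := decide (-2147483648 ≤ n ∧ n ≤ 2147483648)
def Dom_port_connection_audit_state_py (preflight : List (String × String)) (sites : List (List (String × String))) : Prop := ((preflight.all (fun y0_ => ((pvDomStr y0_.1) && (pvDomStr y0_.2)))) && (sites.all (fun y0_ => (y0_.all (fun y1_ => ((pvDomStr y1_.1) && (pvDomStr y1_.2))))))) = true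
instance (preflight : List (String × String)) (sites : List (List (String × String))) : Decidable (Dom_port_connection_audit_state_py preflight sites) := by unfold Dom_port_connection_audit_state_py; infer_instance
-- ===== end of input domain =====

-- B replaces A's two any() scans over sites by one severity-rank fold (max accumulator,
-- early exit on "blocked") mapped back to a state string; return values only, no mutation.

-- ===== PORT A =====
-- A's dict subscripts preflight["status"] / site["audit_state"] appear as getD with a
-- dummy default; Pre_ excludes exactly the inputs where the Python lookup raises KeyError.
def port_connection_audit_state_py (preflight : List (String × String)) (sites : List (List (String × String))) : String :=
  if PySem.Dict.getD (PySem.Dict.mk preflight) "status" "" = "blocked" then "blocked"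
  else if sites.any (fun site => PySem.Dict.getD (PySem.Dict.mk site) "audit_state" "" = "blocked") then "blocked"
  else if sites.any (fun site => PySem.Dict.getD (PySem.Dict.mk site) "audit_state" "" = "review-required") then "review-required"
  else "ready-for-review"

-- ===== PORT B =====
def pvRank (v : String) : Nat :=
  if v = "blocked" then 2 else if v = "review-required" then 1 else 0

-- the for-loop of Source B: fold the max rank over sites, early return at rank 2
def pvScan : List (List (String × String)) → Nat → Nat
  | [], best => best
  | site :: rest, best =>
      let r := pvRank (PySem.Dict.getD (PySem.Dict.mk site) "audit_state" "")
      if r = 2 then 2 else pvScan rest (max best r)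

def port_connection_audit_state_py_alt (preflight : List (String × String)) (sites : List (List (String × String))) : String :=
  if PySem.Dict.getD (PySem.Dict.mk preflight) "status" "" = "blocked" then "blocked"
  else
    match pvScan sites 0 with
    | 2 => "blocked"
    | 1 => "review-required"
    | _ => "ready-for-review"

-- ===== PRECONDITION & SPEC =====
-- Pre_ excludes exactly the inputs where Python A raises KeyError: a preflight without a
-- "status" key, or (when status ≠ "blocked") a site without an "audit_state" key that is
-- reached before any "blocked" site; it admits everything A returns on.
def Pre_port_connection_audit_state_py (preflight : List (String × String)) (sites : List (List (String × String))) : Prop :=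
  (PySem.Dict.get? (PySem.Dict.mk preflight) "status").isSome ∧
  (PySem.Dict.get? (PySem.Dict.mk preflight) "status" = some "blocked" ∨
    ∀ i : Fin sites.length,
      (∀ j : Fin sites.length, j.val < i.val →
        PySem.Dict.get? (PySem.Dict.mk sites[j]) "audit_state" ≠ some "blocked") →
      (PySem.Dict.get? (PySem.Dict.mk sites[i]) "audit_state").isSome)
instance (preflight : List (String × String)) (sites : List (List (String × String))) : Decidable (Pre_port_connection_audit_state_py preflight sites) := by unfold Pre_port_connection_audit_state_py; infer_instance

def pvWitness_port_connection_audit_state_py : (List (String × String)) × (List (List (String × String))) :=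
  ([("status", "ok")], [[("audit_state", "review-required")], [("audit_state", "ready-for-review")]])

def Spec_port_connection_audit_state_py (preflight : List (String × String)) (sites : List (List (String × String))) (out : String) : Prop := out = port_connection_audit_state_py_alt preflight sites
instance (preflight : List (String × String)) (sites : List (List (String × String))) (out : String) : Decidable (Spec_port_connection_audit_state_py preflight sites out) := by unfold Spec_port_connection_audit_state_py; infer_instance

-- ===== CLAIM (what is proved, stated in full; the proofs are below) =====
def Claim_equal_port_connection_audit_state_py : Prop := ∀ (preflight : List (String × String)) (sites : List (List (String × String))), Dom_port_connection_audit_state_py preflight sites → Pre_port_connection_audit_state_py preflight sites → Spec_port_connection_audit_state_py preflight sites (port_connection_audit_state_py preflight sites)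

-- ===== LEMMAS AND PROOFS =====

-- pvScan computes the two any-scans' information in one pass
theorem pvScan_eq (sites : List (List (String × String))) (best : Nat) :
    pvScan sites best =
      if sites.any (fun site => PySem.Dict.getD (PySem.Dict.mk site) "audit_state" "" = "blocked") then 2
      else max best (if sites.any (fun site => PySem.Dict.getD (PySem.Dict.mk site) "audit_state" "" = "review-required") then 1 else 0) := by
  induction sites generalizing best with
  | nil => simp [pvScan]
  | cons site rest ih =>
      simp only [pvScan, List.any_cons, pvRank]
      by_cases hb : PySem.Dict.getD (PySem.Dict.mk site) "audit_state" "" = "blocked"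
      · simp [hb]
      · by_cases hr : PySem.Dict.getD (PySem.Dict.mk site) "audit_state" "" = "review-required"
        · simp [hr, ih]
          split_ifs <;> omega
        · simp [hb, hr, ih]

theorem port_connection_audit_state_py_spec : Claim_equal_port_connection_audit_state_py := by
  intro preflight sites _ _
  unfold Spec_port_connection_audit_state_py port_connection_audit_state_py port_connection_audit_state_py_alt
  rw [pvScan_eq]
  by_cases hp : PySem.Dict.getD (PySem.Dict.mk preflight) "status" "" = "blocked"
  · simp [hp]
  · by_cases hb : sites.any (fun site => PySem.Dict.getD (PySem.Dict.mk site) "audit_state" "" = "blocked")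
    · simp [hp, hb]
    · by_cases hr : sites.any (fun site => PySem.Dict.getD (PySem.Dict.mk site) "audit_state" "" = "review-required") <;>
        simp [hp, hb, hr]
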